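-- pv_equiv track=rewrite | github.com/max22-/nova-experiments | compiler_uxn.py | uxnify_identifier
-- ===== SOURCE A (Python) =====
-- def uxnify_identifier(identifier):
--     chunks = []
--     chunk = ""
--     for c in identifier:
--         if c in [' ', '"']:
--             if chunk != '':
--                 chunks.append(chunk)
--                 chunk = ""
--             chunks.append(f"{ord(c):02x}")
--         else:
--             if chunk == '':
--                 chunk = '"'
--             chunk += c
--     if chunk != '':
--         chunks.append(chunk)
--     return ' '.join(chunks)
-- ===== SOURCE B (Python) =====
-- def uxnify_identifier(identifier):
--     tokens = []
--     i, n = 0, len(identifier)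
--     while i < n:
--         special = identifier[i] in ' "'
--         j = i
--         while j < n and (identifier[j] in ' "') == special:
--             j += 1
--         run = identifier[i:j]
--         if special:
--             tokens.extend(f"{ord(c):02x}" for c in run)
--         else:
--             tokens.append('"' + run)
--         i = j
--     return ' '.join(tokens)
-- ===== Notes on version B (the rewrite author's own statement) =====
-- stated objective: alternative
-- what changed: Replaced A's char-by-char flush-on-transition accumulator with a two-pointer scan that extracts maximal runs of same-class characters and maps each run to its token(s).
import Mathlib
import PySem

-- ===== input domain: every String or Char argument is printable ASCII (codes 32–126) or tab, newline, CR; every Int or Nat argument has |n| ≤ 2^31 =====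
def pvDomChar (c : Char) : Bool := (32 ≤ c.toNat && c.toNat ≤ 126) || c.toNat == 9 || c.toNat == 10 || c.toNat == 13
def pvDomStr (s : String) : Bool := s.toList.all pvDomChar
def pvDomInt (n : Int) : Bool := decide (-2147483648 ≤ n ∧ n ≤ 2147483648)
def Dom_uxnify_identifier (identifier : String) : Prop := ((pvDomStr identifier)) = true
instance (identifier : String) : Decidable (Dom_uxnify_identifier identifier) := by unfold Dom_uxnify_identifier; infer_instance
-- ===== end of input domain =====

-- B replaces A's flush-on-transition accumulator by a two-pointer scan over maximal
-- runs of same-class characters (objective: alternative decomposition, same cost).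

-- f"{ord(c):02x}": two lowercase hex digits of the character code (codes here are < 256)
def hexDigit (n : Nat) : Char := if n < 10 then Char.ofNat (48 + n) else Char.ofNat (87 + n)
def hex2 (c : Char) : String := String.ofList [hexDigit (c.toNat / 16 % 16), hexDigit (c.toNat % 16)]

-- ===== PORT A =====
-- the body of A's for-loop, acting on the state (chunks, chunk)
def uxnStepA (st : List String × String) (c : Char) : List String × String :=
  if c = ' ' ∨ c = '"' then
    let p := if st.2 ≠ "" then (st.1 ++ [st.2], "") else st
    (p.1 ++ [hex2 c], p.2)
  else
    let chunk := if st.2 = "" then "\"" else st.2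
    (st.1, chunk.push c)

def uxnify_identifier (identifier : String) : String :=
  PySem.Str.join " "
    (if (identifier.toList.foldl uxnStepA ([], "")).2 ≠ "" then
      (identifier.toList.foldl uxnStepA ([], "")).1 ++ [(identifier.toList.foldl uxnStepA ([], "")).2]
    else (identifier.toList.foldl uxnStepA ([], "")).1)

-- ===== PORT B =====
def uxnSpecial (c : Char) : Bool := c = ' ' || c = '"'

-- the outer while loop of B: take the maximal run of same-class characters, emit its
-- token(s), continue after the run
def uxnGroups : List Char → List String
  | [] => []
  | c :: cs =>
    if uxnSpecial c then
      (c :: cs.takeWhile uxnSpecial).map hex2 ++ uxnGroups (cs.dropWhile uxnSpecial)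
    else
      String.ofList ('"' :: c :: cs.takeWhile (fun d => !uxnSpecial d)) ::
        uxnGroups (cs.dropWhile (fun d => !uxnSpecial d))
  termination_by l => l.length
  decreasing_by
    · exact Nat.lt_succ_of_le (List.length_dropWhile_le _ _)
    · exact Nat.lt_succ_of_le (List.length_dropWhile_le _ _)

def uxnify_identifier_alt (identifier : String) : String :=
  PySem.Str.join " " (uxnGroups identifier.toList)

-- ===== PRECONDITION & SPEC =====
def Spec_uxnify_identifier (identifier : String) (out : String) : Prop := out = uxnify_identifier_alt identifier
instance (identifier : String) (out : String) : Decidable (Spec_uxnify_identifier identifier out) := by unfold Spec_uxnify_identifier; infer_instance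

-- ===== CLAIM (what is proved, stated in full; the proofs are below) =====
def Claim_equal_uxnify_identifier : Prop := ∀ (identifier : String), Dom_uxnify_identifier identifier → Spec_uxnify_identifier identifier (uxnify_identifier identifier)

-- ===== LEMMAS AND PROOFS =====

-- the token list A's loop emits, with the pending chunk carried as a list of chars
def tokA : List Char → List Char → List String
  | [], k => if k ≠ [] then [String.ofList k] else []
  | c :: cs, k =>
    if uxnSpecial c then
      (if k ≠ [] then [String.ofList k] else []) ++ hex2 c :: tokA cs []
    else
      tokA cs ((if k = [] then ['"'] else k) ++ [c])

theorem foldA (cs : List Char) : ∀ (chunks : List String) (s : String),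
    (if (cs.foldl uxnStepA (chunks, s)).2 ≠ "" then
      (cs.foldl uxnStepA (chunks, s)).1 ++ [(cs.foldl uxnStepA (chunks, s)).2]
    else (cs.foldl uxnStepA (chunks, s)).1)
    = chunks ++ tokA cs s.toList := by
  induction cs with
  | nil =>
    intro chunks s
    by_cases h : s = "" <;> simp [tokA, h]
  | cons c cs ih =>
    intro chunks s
    by_cases hc : uxnSpecial c
    · have hc' : c = ' ' ∨ c = '"' := by simpa [uxnSpecial] using hc
      by_cases hs : s = ""
      · simpa [tokA, uxnStepA, hc, hc', hs] using ih (chunks ++ [hex2 c]) ""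
      · have h1 : s.toList ≠ [] := by simpa using hs
        simpa [tokA, uxnStepA, hc, hc', hs, h1] using ih (chunks ++ [s, hex2 c]) ""
    · have hc' : ¬ (c = ' ' ∨ c = '"') := by simpa [uxnSpecial] using hc
      by_cases hs : s = ""
      · have hq : ("\"" : String) = String.ofList ['"'] := rfl
        simpa [tokA, uxnStepA, hc, hc', hs, hq] using ih chunks ("\"".push c)
      · have h1 : s.toList ≠ [] := by simpa using hs
        simpa [tokA, uxnStepA, hc, hc', hs, h1] using ih chunks (s.push c)

theorem uxnGroups_special_split (cs : List Char) :
    uxnGroups cs = (cs.takeWhile uxnSpecial).map hex2 ++ uxnGroups (cs.dropWhile uxnSpecial) := by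
  cases cs with
  | nil => simp [uxnGroups]
  | cons c cs =>
    by_cases hc : uxnSpecial c
    · rw [uxnGroups.eq_def]; simp [hc]
    · simp [hc]

theorem tokA_groups (cs : List Char) :
    (tokA cs [] = uxnGroups cs) ∧
    (∀ k : List Char, k ≠ [] →
      tokA cs k = String.ofList (k ++ cs.takeWhile (fun d => !uxnSpecial d)) ::
        uxnGroups (cs.dropWhile (fun d => !uxnSpecial d))) := by
  induction cs with
  | nil =>
    refine ⟨by simp [tokA, uxnGroups], ?_⟩
    intro k hk
    simp [tokA, uxnGroups, hk]
  | cons c cs ih =>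
    by_cases hc : uxnSpecial c
    · constructor
      · rw [tokA, uxnGroups.eq_def]
        simp [hc, ih.1, uxnGroups_special_split cs]
      · intro k hk
        rw [tokA, uxnGroups.eq_def]
        simp [hc, hk, ih.1, uxnGroups_special_split cs]
    · constructor
      · rw [tokA, uxnGroups.eq_def]
        simpa [hc] using ih.2 (['"'] ++ [c]) (by simp)
      · intro k hk
        rw [tokA]
        have h2 := ih.2 (k ++ [c]) (by simp)
        simp [hc, hk, h2]

-- ===== VERDICT (by name: the statement is the Claim_ definition above) =====
theorem uxnify_identifier_spec : Claim_equal_uxnify_identifier := by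
  intro identifier _
  show _ = _
  unfold uxnify_identifier uxnify_identifier_alt
  rw [foldA identifier.toList [] ""]
  simp [(tokA_groups identifier.toList).1]
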